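-- pv_equiv track=rewrite | github.com/koala-man-64/asset-allocation-control-plane | api/endpoints/system_modules/status_read.py | _merge_live_job_runs
-- ===== SOURCE A (Python) =====
-- from typing import Any, Dict, List, Literal, Optional, Sequence
--
-- def _normalize_job_name_key(value: Any) -> str:
--     return str(value or "").strip().lower()
--
-- def _same_job_run(left: Dict[str, Any], right: Dict[str, Any]) -> bool:
--     job_names_match = _normalize_job_name_key(left.get("jobName")) == _normalize_job_name_key(
--         right.get("jobName")
--     )
--
--     left_execution_name = str(left.get("executionName") or "").strip()
--     right_execution_name = str(right.get("executionName") or "").strip()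
--     left_start_time = str(left.get("startTime") or "").strip()
--     right_start_time = str(right.get("startTime") or "").strip()
--
--     execution_names_match = bool(
--         left_execution_name and right_execution_name and left_execution_name == right_execution_name
--     )
--     start_times_match = bool(left_start_time and right_start_time and left_start_time == right_start_time)
--
--     return job_names_match and (
--         execution_names_match or (not (left_execution_name and right_execution_name) and start_times_match)
--     )
--
-- def _merge_live_job_runs(
--     existing_runs: Sequence[Dict[str, Any]],
--     live_runs: Sequence[Dict[str, Any]],
-- ) -> List[Dict[str, Any]]:
--     merged: List[Dict[str, Any]] = [dict(run) for run in existing_runs if isinstance(run, dict)]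
--
--     for live_run in live_runs:
--         if not isinstance(live_run, dict):
--             continue
--         if not _normalize_job_name_key(live_run.get("jobName")):
--             continue
--
--         filtered = [run for run in merged if not _same_job_run(run, live_run)]
--         filtered.insert(0, dict(live_run))
--         merged = filtered
--
--     return merged
-- ===== SOURCE B (Python) =====
-- from typing import Any, Dict, List, Sequence, Tuple
--
--
-- def _key(run: Dict[str, Any]) -> Tuple[str, str, str]:
--     # Normalize each run once into a comparable (jobName, executionName, startTime) key.
--     return (
--         str(run.get("jobName") or "").strip().lower(),
--         str(run.get("executionName") or "").strip(),
--         str(run.get("startTime") or "").strip(),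
--     )
--
--
-- def _key_match(a: Tuple[str, str, str], b: Tuple[str, str, str]) -> bool:
--     if a[0] != b[0]:
--         return False
--     if a[1] and b[1]:
--         return a[1] == b[1]
--     return bool(a[2] and b[2] and a[2] == b[2])
--
--
-- def _merge_live_job_runs(
--     existing_runs: Sequence[Dict[str, Any]],
--     live_runs: Sequence[Dict[str, Any]],
-- ) -> List[Dict[str, Any]]:
--     # Precompute keys once; two independent passes instead of iterative filter-and-prepend.
--     tagged = [
--         (run, _key(run))
--         for run in live_runs
--         if isinstance(run, dict) and _key(run)[0]
--     ]
--
--     # A valid live run survives iff no LATER valid live run's key matches; survivors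
--     # end up at the front in reverse input order.
--     front: List[Dict[str, Any]] = []
--     for i, (run, k) in enumerate(tagged):
--         if not any(_key_match(k, k2) for _, k2 in tagged[i + 1:]):
--             front.insert(0, dict(run))
--
--     # An existing run survives iff no valid live run's key matches it.
--     keys = [k for _, k in tagged]
--     back: List[Dict[str, Any]] = []
--     for run in existing_runs:
--         if isinstance(run, dict) and not any(_key_match(_key(run), k) for k in keys):
--             back.append(dict(run))
--
--     return front + back
-- ===== Notes on version B (the rewrite author's own statement) =====
-- stated objective: alternative
-- what changed: Replaces the iterative filter-and-prepend loop (which rebuilds the whole merged list once per live run and re-normalizes fields on every comparison) by key precomputation plus two independent passes: each run is normalized once into a (jobName, executionName, startTime) key, live survivors (not key-matched by any later valid live run) are emitted in reverse order at the front, and existing runs are filtered once against all valid live keys.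
import Mathlib
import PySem

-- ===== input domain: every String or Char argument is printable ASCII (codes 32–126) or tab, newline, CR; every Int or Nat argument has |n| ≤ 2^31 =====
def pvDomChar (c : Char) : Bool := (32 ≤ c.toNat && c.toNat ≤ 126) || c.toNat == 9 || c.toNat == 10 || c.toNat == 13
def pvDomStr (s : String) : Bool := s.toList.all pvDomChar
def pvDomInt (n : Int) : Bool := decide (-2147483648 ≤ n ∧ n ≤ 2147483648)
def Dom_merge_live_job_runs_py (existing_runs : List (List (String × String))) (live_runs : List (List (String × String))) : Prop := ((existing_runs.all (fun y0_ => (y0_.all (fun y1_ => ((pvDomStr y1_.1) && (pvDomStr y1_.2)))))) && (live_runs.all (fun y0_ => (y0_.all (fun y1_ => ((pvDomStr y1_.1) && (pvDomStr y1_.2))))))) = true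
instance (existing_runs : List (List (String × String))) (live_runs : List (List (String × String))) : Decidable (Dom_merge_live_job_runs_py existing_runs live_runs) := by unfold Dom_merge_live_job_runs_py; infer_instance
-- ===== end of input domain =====

-- B precomputes a normalized (jobName, executionName, startTime) key per run and rebuilds the
-- merge as two independent passes over keys, instead of A's iterative filter-and-prepend loop.


-- ===== PORT A =====
-- dict.get(k): first match in the association list (unique keys by the dict convention)
def pvGetKey (run : List (String × String)) (k : String) : Option String :=
  (run.find? (fun p => p.1 == k)).map (·.2)

-- str(value or "").strip().lower(); 'value or ""' maps None and "" to "" (strings: falsy = empty)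
def pvNormJobName (v : Option String) : String :=
  PySem.Str.lower (PySem.Str.strip (v.getD ""))

-- str(value or "").strip()
def pvStripOpt (v : Option String) : String :=
  PySem.Str.strip (v.getD "")

-- literal port of _same_job_run
def pvSameJobRun (left right : List (String × String)) : Bool :=
  let job_names_match := pvNormJobName (pvGetKey left "jobName") == pvNormJobName (pvGetKey right "jobName")
  let le := pvStripOpt (pvGetKey left "executionName")
  let re := pvStripOpt (pvGetKey right "executionName")
  let ls := pvStripOpt (pvGetKey left "startTime")
  let rs := pvStripOpt (pvGetKey right "startTime")
  let execution_names_match := le != "" && re != "" && le == re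
  let start_times_match := ls != "" && rs != "" && ls == rs
  job_names_match && (execution_names_match || (!(le != "" && re != "") && start_times_match))

-- A: merged starts as (copies of) existing_runs (every element is a dict under the type
-- convention, so the isinstance filter keeps all and dict(run) is the identity); each live run
-- with a non-empty normalized jobName filters out its matches and is prepended.
def merge_live_job_runs_py (existing_runs : List (List (String × String))) (live_runs : List (List (String × String))) : List (List (String × String)) :=
  live_runs.foldl
    (fun merged live_run =>
      if pvNormJobName (pvGetKey live_run "jobName") != "" then
        live_run :: merged.filter (fun run => !pvSameJobRun run live_run)
      else merged)
    existing_runs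

-- ===== PORT B =====
-- Source B's _key: normalize each run once into a (jobName, executionName, startTime) key
def pvLookup (run : List (String × String)) (k : String) : String :=
  match run.find? (fun p => p.1 == k) with
  | some p => p.2
  | none => ""

def pvKey (run : List (String × String)) : String × String × String :=
  (PySem.Str.lower (PySem.Str.strip (pvLookup run "jobName")),
   PySem.Str.strip (pvLookup run "executionName"),
   PySem.Str.strip (pvLookup run "startTime"))

-- Source B's _key_match: compare precomputed keys
def pvKeyMatch (a b : String × String × String) : Bool :=
  if a.1 != b.1 then false
  else if a.2.1 != "" && b.2.1 != "" then a.2.1 == b.2.1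
  else a.2.2 != "" && b.2.2 != "" && a.2.2 == b.2.2

-- Source B's front pass: a tagged live run survives iff no later tagged key matches; survivors
-- come out in reverse input order (later survivors first)
def pvMergeFront : List (List (String × String) × (String × String × String)) → List (List (String × String))
  | [] => []
  | (run, k) :: rest =>
      let tail := pvMergeFront rest
      if rest.any (fun q => pvKeyMatch k q.2) then tail else tail ++ [run]

-- Source B's back pass: keep an existing run iff no valid live key matches its key
def pvKeepExisting (keys : List (String × String × String)) : List (List (String × String)) → List (List (String × String))
  | [] => []
  | run :: rest =>
      if keys.any (fun k => pvKeyMatch (pvKey run) k) then pvKeepExisting keys rest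
      else run :: pvKeepExisting keys rest

def merge_live_job_runs_py_alt (existing_runs : List (List (String × String))) (live_runs : List (List (String × String))) : List (List (String × String)) :=
  let tagged := (live_runs.map (fun run => (run, pvKey run))).filter (fun p => p.2.1 != "")
  pvMergeFront tagged ++ pvKeepExisting (tagged.map (·.2)) existing_runs

-- ===== PRECONDITION & SPEC =====
def Spec_merge_live_job_runs_py (existing_runs : List (List (String × String))) (live_runs : List (List (String × String))) (out : List (List (String × String))) : Prop := out = merge_live_job_runs_py_alt existing_runs live_runs
instance (existing_runs : List (List (String × String))) (live_runs : List (List (String × String))) (out : List (List (String × String))) : Decidable (Spec_merge_live_job_runs_py existing_runs live_runs out) := by unfold Spec_merge_live_job_runs_py; infer_instance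

-- ===== CLAIM (what is proved, stated in full; the proofs are below) =====
def Claim_equal_merge_live_job_runs_py : Prop := ∀ (existing_runs : List (List (String × String))) (live_runs : List (List (String × String))), Dom_merge_live_job_runs_py existing_runs live_runs → Spec_merge_live_job_runs_py existing_runs live_runs (merge_live_job_runs_py existing_runs live_runs)

-- ===== LEMMAS AND PROOFS =====

-- B's per-run lookup equals A's optional lookup defaulted to ""
theorem pv_lookup_eq (run : List (String × String)) (k : String) :
    pvLookup run k = (pvGetKey run k).getD "" := by
  unfold pvLookup pvGetKey
  cases run.find? (fun p => p.1 == k) <;> simp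

-- boolean core of the key comparison, over arbitrary strings
theorem pv_bkey (j1 j2 e1 e2 s1 s2 : String) :
    (if j1 != j2 then false
     else if e1 != "" && e2 != "" then e1 == e2
     else s1 != "" && s2 != "" && s1 == s2)
    = ((j1 == j2) && ((e1 != "" && e2 != "" && e1 == e2) ||
        (!(e1 != "" && e2 != "") && (s1 != "" && s2 != "" && s1 == s2)))) := by
  by_cases hj : j1 = j2 <;> by_cases h1 : e1 = "" <;> by_cases h2 : e2 = "" <;>
    simp [hj, h1, h2, bne, beq_eq_decide]

-- key comparison on precomputed keys coincides with A's _same_job_run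
theorem pv_key_match (l r : List (String × String)) :
    pvKeyMatch (pvKey l) (pvKey r) = pvSameJobRun l r := by
  simp only [pvKeyMatch, pvKey, pvSameJobRun, pvNormJobName, pvStripOpt, pv_lookup_eq]
  exact pv_bkey _ _ _ _ _ _

-- a run is valid iff its precomputed key has a non-empty jobName component
theorem pv_valid_eq (run : List (String × String)) :
    (pvKey run).1 = pvNormJobName (pvGetKey run "jobName") := by
  simp [pvKey, pvNormJobName, pv_lookup_eq]

-- Folding over all live runs with the validity guard equals folding the unguarded step over the
-- valid ones.
theorem pv_fold_filter (g : List (List (String × String)) → List (String × String) → List (List (String × String)))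
    (p : List (String × String) → Bool) (l : List (List (String × String))) (acc : List (List (String × String))) :
    l.foldl (fun m x => if p x then g m x else m) acc = (l.filter p).foldl g acc := by
  induction l generalizing acc with
  | nil => rfl
  | cons x xs ih =>
      by_cases h : p x <;> simp [h, ih]

-- B's back pass is a filter against the key list
theorem pv_keep_eq (keys : List (String × String × String)) (xs : List (List (String × String))) :
    pvKeepExisting keys xs = xs.filter (fun run => !keys.any (fun k => pvKeyMatch (pvKey run) k)) := by
  induction xs with
  | nil => rfl
  | cons x rest ih =>
      by_cases h : keys.any (fun k => pvKeyMatch (pvKey x) k) <;> simp [pvKeepExisting, h, ih]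

-- Main invariant: the unguarded fold over the valid live runs produces B's front (survivors in
-- reverse order) followed by the accumulator filtered against every valid live run.
theorem pv_fold_main (vl : List (List (String × String))) (m : List (List (String × String))) :
    vl.foldl (fun merged lr => lr :: merged.filter (fun run => !pvSameJobRun run lr)) m
      = pvMergeFront (vl.map (fun run => (run, pvKey run)))
        ++ m.filter (fun run => !(vl.any (fun live => pvSameJobRun run live))) := by
  induction vl generalizing m with
  | nil => simp [pvMergeFront]
  | cons l rest ih =>
      simp only [List.foldl_cons, ih, List.map_cons, pvMergeFront, List.any_map,
        Function.comp_def, pv_key_match]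
      by_cases h : rest.any (fun later => pvSameJobRun l later)
      · simp [h, List.filter_filter, Bool.and_comm]
      · simp [h, List.filter_filter, Bool.and_comm, List.append_assoc]

-- the tagged list is the valid live runs, each paired with its key
theorem pv_tagged_eq (live_runs : List (List (String × String))) :
    (live_runs.map (fun run => (run, pvKey run))).filter (fun p => p.2.1 != "")
      = (live_runs.filter (fun run => pvNormJobName (pvGetKey run "jobName") != "")).map
          (fun run => (run, pvKey run)) := by
  induction live_runs with
  | nil => rfl
  | cons x xs ih =>
      simp only [List.map_cons, List.filter_cons]
      by_cases h : pvNormJobName (pvGetKey x "jobName") = "" <;>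
        simp [pv_valid_eq, h, ih]

-- ===== VERDICT (by name: the statement is the Claim_ definition above) =====
theorem merge_live_job_runs_py_spec : Claim_equal_merge_live_job_runs_py := by
  intro existing_runs live_runs _
  unfold Spec_merge_live_job_runs_py merge_live_job_runs_py
  have halt : merge_live_job_runs_py_alt existing_runs live_runs
      = pvMergeFront ((live_runs.map (fun run => (run, pvKey run))).filter (fun p => p.2.1 != ""))
        ++ pvKeepExisting (((live_runs.map (fun run => (run, pvKey run))).filter
            (fun p => p.2.1 != "")).map (·.2)) existing_runs := rfl
  rw [halt, pv_tagged_eq, pv_keep_eq]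
  rw [pv_fold_filter
    (fun merged lr => lr :: merged.filter (fun run => !pvSameJobRun run lr))
    (fun run => pvNormJobName (pvGetKey run "jobName") != "")]
  rw [pv_fold_main]
  congr 1
  apply List.filter_congr
  intro run _
  simp [List.any_map, pv_key_match]
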